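-- pv_equiv track=rewrite | github.com/ishebord/MIP---IFC-Checker | ifc_ids_validator/summary.py | _model_description
-- ===== SOURCE A (Python) =====
-- from typing import List, Dict, Any
--
-- def _norm(v) -> str:
--     if v is None:
--         return ""
--     return str(v).strip()
--
-- def _build_description_lookup(section_descriptions: List[List[str]] | None) -> List[tuple[str, str]]:
--     result: List[tuple[str, str]] = []
--
--     if not section_descriptions:
--         return result
--
--     for row in section_descriptions:
--         if not isinstance(row, (list, tuple)) or len(row) < 2:
--             continue
--
--         code = str(row[0]).strip()
--         desc = str(row[1]).strip()
--
--         if not code: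
--             continue
--
--         result.append((code.upper(), desc))
--
--     result.sort(key=lambda x: len(x[0]), reverse=True)
--     return result
--
-- def _model_description(model_name: str, section_descriptions: List[List[str]] | None) -> str:
--     model_upper = _norm(model_name).upper()
--     if not model_upper:
--         return "—"
--
--     lookup = _build_description_lookup(section_descriptions)
--     if not lookup:
--         return "—"
--
--     normalized = model_upper.replace(".", "_").replace("-", "_").replace(" ", "_")
--
--     for code, desc in lookup:
--         patterns = (
--             f"_{code}_",
--             f"{code}_",
--             f"_{code}",
--         )
--
--         if normalized == code:
--             return desc
--
--         if any(p in normalized for p in patterns):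
--             return desc
--
--         if code in model_upper:
--             return desc
--
--     return "—"
-- ===== SOURCE B (Python) =====
-- def _model_description(model_name, section_descriptions):
--     model_upper = model_name.strip().upper()
--     if not model_upper:
--         return "—"
--
--     normalized = model_upper.replace(".", "_").replace("-", "_").replace(" ", "_")
--
--     best_code = None
--     best_desc = ""
--     for row in (section_descriptions or []):
--         if len(row) < 2:
--             continue
--         code = str(row[0]).strip().upper()
--         if not code:
--             continue
--         if best_code is not None and len(code) <= len(best_code):
--             continue
--         if (normalized == code
--                 or f"_{code}_" in normalized
--                 or f"{code}_" in normalized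
--                 or f"_{code}" in normalized
--                 or code in model_upper):
--             best_code = code
--             best_desc = str(row[1]).strip()
--     return best_desc if best_code is not None else "—"
-- ===== Notes on version B (the rewrite author's own statement) =====
-- stated objective: alternative
-- what changed: Replaces A's build-lookup-then-stable-sort-by-length-then-first-match pipeline with a single pass over the rows that keeps the best (strictly longest, earliest) matching code, so the sort disappears.
import Mathlib
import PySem

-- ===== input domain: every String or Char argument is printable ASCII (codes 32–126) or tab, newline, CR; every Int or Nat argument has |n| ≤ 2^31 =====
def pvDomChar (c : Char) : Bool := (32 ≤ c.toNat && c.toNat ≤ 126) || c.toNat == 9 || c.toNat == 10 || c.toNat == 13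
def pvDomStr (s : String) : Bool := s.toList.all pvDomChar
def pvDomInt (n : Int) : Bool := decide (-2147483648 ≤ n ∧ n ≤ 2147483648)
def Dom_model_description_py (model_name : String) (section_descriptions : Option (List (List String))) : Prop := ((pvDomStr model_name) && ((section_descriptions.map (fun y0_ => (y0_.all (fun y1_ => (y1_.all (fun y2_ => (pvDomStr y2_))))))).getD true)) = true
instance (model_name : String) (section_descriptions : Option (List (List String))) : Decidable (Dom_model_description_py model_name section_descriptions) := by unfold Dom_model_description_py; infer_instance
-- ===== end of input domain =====

-- B replaces A's build-then-stable-sort-then-first-match pipeline by a single pass over the rows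
-- keeping the best (strictly longest, earliest) matching code; objective: alternative (one pass, no sort).

-- ===== PORT A =====
-- A's `any(p in normalized for p in patterns)` over the three underscore patterns.
def pvPatternsHit (normalized code : List Char) : Bool :=
  [('_' :: code ++ ['_']), (code ++ ['_']), ('_' :: code)].any
    (fun p => PySem.Chars.isIn p normalized)

-- A's scan loop over the sorted lookup: first matching (code, desc) wins.
def pvScanA (normalized modelUpper : List Char) : List (List Char × String) → String
  | [] => "—"
  | (code, desc) :: rest =>
    if normalized = code then desc
    else if pvPatternsHit normalized code then desc
    else if PySem.Chars.isIn code modelUpper then desc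
    else pvScanA normalized modelUpper rest

-- A's build-loop body (one row appended to the accumulating lookup).
def pvStepA (acc : List (List Char × String)) (row : List String) : List (List Char × String) :=
  if row.length < 2 then acc
  else if PySem.Chars.strip (row.getD 0 "").toList = [] then acc
  else acc ++ [(PySem.Chars.upper (PySem.Chars.strip (row.getD 0 "").toList),
    PySem.Str.strip (row.getD 1 ""))]

-- A's _build_description_lookup (codes kept as List Char; isinstance check is vacuous on the typed input).
def pvBuildLookup (section_descriptions : Option (List (List String))) : List (List Char × String) :=
  match section_descriptions with
  | none => []
  | some rows =>
    if rows = [] then []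
    else
      let result := rows.foldl pvStepA []
      PySem.List.sorted result (fun x => x.1.length) true

def model_description_py (model_name : String) (section_descriptions : Option (List (List String))) : String :=
  let model_upper := PySem.Chars.upper (PySem.Chars.strip model_name.toList)
  if model_upper = [] then "—"
  else
    let lookup := pvBuildLookup section_descriptions
    if lookup = [] then "—"
    else
      let normalized := PySem.Chars.replace (PySem.Chars.replace
        (PySem.Chars.replace model_upper ['.'] ['_']) ['-'] ['_']) [' '] ['_']
      pvScanA normalized model_upper lookup

-- ===== PORT B =====
-- B's or-chain match predicate.
def pvMatchB (normalized modelUpper code : List Char) : Bool :=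
  decide (normalized = code)
    || PySem.Chars.isIn ('_' :: code ++ ['_']) normalized
    || PySem.Chars.isIn (code ++ ['_']) normalized
    || PySem.Chars.isIn ('_' :: code) normalized
    || PySem.Chars.isIn code modelUpper

-- B's per-row update of the best (code, desc) seen so far.
def pvStepB (normalized modelUpper : List Char) (best : Option (List Char × String))
    (row : List String) : Option (List Char × String) :=
  if row.length < 2 then best
  else if PySem.Chars.upper (PySem.Chars.strip (row.getD 0 "").toList) = [] then best
  else
    match best with
    | some (bc, _) =>
      if (PySem.Chars.upper (PySem.Chars.strip (row.getD 0 "").toList)).length ≤ bc.length then best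
      else if pvMatchB normalized modelUpper (PySem.Chars.upper (PySem.Chars.strip (row.getD 0 "").toList)) then
        some (PySem.Chars.upper (PySem.Chars.strip (row.getD 0 "").toList), PySem.Str.strip (row.getD 1 ""))
      else best
    | none =>
      if pvMatchB normalized modelUpper (PySem.Chars.upper (PySem.Chars.strip (row.getD 0 "").toList)) then
        some (PySem.Chars.upper (PySem.Chars.strip (row.getD 0 "").toList), PySem.Str.strip (row.getD 1 ""))
      else best

def model_description_py_alt (model_name : String) (section_descriptions : Option (List (List String))) : String :=
  let model_upper := PySem.Chars.upper (PySem.Chars.strip model_name.toList)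
  if model_upper = [] then "—"
  else
    let normalized := PySem.Chars.replace (PySem.Chars.replace
      (PySem.Chars.replace model_upper ['.'] ['_']) ['-'] ['_']) [' '] ['_']
    match (section_descriptions.getD []).foldl (pvStepB normalized model_upper) none with
    | some (_, d) => d
    | none => "—"

-- ===== PRECONDITION & SPEC =====
def Spec_model_description_py (model_name : String) (section_descriptions : Option (List (List String))) (out : String) : Prop := out = model_description_py_alt model_name section_descriptions
instance (model_name : String) (section_descriptions : Option (List (List String))) (out : String) : Decidable (Spec_model_description_py model_name section_descriptions out) := by unfold Spec_model_description_py; infer_instance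

-- ===== CLAIM (what is proved, stated in full; the proofs are below) =====
def Claim_equal_model_description_py : Prop := ∀ (model_name : String) (section_descriptions : Option (List (List String))), Dom_model_description_py model_name section_descriptions → Spec_model_description_py model_name section_descriptions (model_description_py model_name section_descriptions)

-- ===== LEMMAS AND PROOFS =====

-- The step over already-extracted (code, desc) pairs that B's row step performs on valid rows.
def pvStepP (normalized modelUpper : List Char) (best : Option (List Char × String))
    (p : List Char × String) : Option (List Char × String) :=
  match best with
  | some (bc, _) =>
    if p.1.length ≤ bc.length then best
    else if pvMatchB normalized modelUpper p.1 then some p else best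
  | none => if pvMatchB normalized modelUpper p.1 then some p else best

-- Row → lookup entry, exactly A's (and B's) row guards.
def pvRowEntry (row : List String) : Option (List Char × String) :=
  if row.length < 2 then none
  else if PySem.Chars.strip (row.getD 0 "").toList = [] then none
  else some (PySem.Chars.upper (PySem.Chars.strip (row.getD 0 "").toList),
    PySem.Str.strip (row.getD 1 ""))

theorem pvScanA_eq_find? (n u : List Char) (l : List (List Char × String)) :
    pvScanA n u l = (match l.find? (fun p => pvMatchB n u p.1) with
      | some p => p.2
      | none => "—") := by
  induction l with
  | nil => rfl
  | cons p rest ih =>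
    obtain ⟨code, desc⟩ := p
    rw [List.find?_cons]
    by_cases h1 : n = code <;>
      cases h2 : PySem.Chars.isIn ('_' :: code ++ ['_']) n <;>
      cases h3 : PySem.Chars.isIn (code ++ ['_']) n <;>
      cases h4 : PySem.Chars.isIn ('_' :: code) n <;>
      cases h5 : PySem.Chars.isIn code u <;>
      simp_all [pvScanA, pvMatchB, pvPatternsHit]

theorem pvFind?_insertBy (n u : List Char) (x : List Char × String)
    (s : List (List Char × String))
    (hpw : s.Pairwise (fun a b => b.1.length ≤ a.1.length)) :
    (PySem.List.insertBy (fun a b => decide (b.1.length < a.1.length)) x s).find?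
        (fun p => pvMatchB n u p.1) =
      (match s.find? (fun p => pvMatchB n u p.1) with
        | none => if pvMatchB n u x.1 then some x else none
        | some y => if x.1.length ≤ y.1.length then some y
                    else if pvMatchB n u x.1 then some x else some y) := by
  induction s with
  | nil =>
    simp only [PySem.List.insertBy, List.find?_nil, List.find?_cons]
    cases h : pvMatchB n u x.1 <;> simp
  | cons y ys ih =>
    rw [List.pairwise_cons] at hpw
    obtain ⟨hy, hys⟩ := hpw
    by_cases hb : y.1.length < x.1.length
    · have hins : PySem.List.insertBy (fun a b => decide (b.1.length < a.1.length)) x (y :: ys)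
          = x :: y :: ys := by simp [PySem.List.insertBy, hb]
      rw [hins, List.find?_cons]
      cases hfy : (y :: ys).find? (fun p => pvMatchB n u p.1) with
      | none => cases hx : pvMatchB n u x.1 <;> simp_all
      | some z =>
        have hz : z ∈ y :: ys := List.mem_of_find?_eq_some hfy
        have hzle : z.1.length ≤ y.1.length := by
          rcases List.mem_cons.mp hz with h | h
          · simp [h]
          · exact hy z h
        have hnle : ¬ x.1.length ≤ z.1.length := by omega
        cases hx : pvMatchB n u x.1 <;> simp_all
    · have hins : PySem.List.insertBy (fun a b => decide (b.1.length < a.1.length)) x (y :: ys)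
          = y :: PySem.List.insertBy (fun a b => decide (b.1.length < a.1.length)) x ys := by
        simp [PySem.List.insertBy, hb]
      rw [hins, List.find?_cons, List.find?_cons]
      cases hyP : pvMatchB n u y.1 with
      | true =>
        have hle : x.1.length ≤ y.1.length := by omega
        simp [hle]
      | false =>
        simp only [ih hys]

theorem pvCore (n u : List Char) (l : List (List Char × String)) :
    (PySem.List.sorted l (fun x => x.1.length) true).find? (fun p => pvMatchB n u p.1)
      = l.foldl (pvStepP n u) none := by
  rw [PySem.List.sorted_rev_eq_foldl_insertBy]
  induction l using List.reverseRecOn with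
  | nil => rfl
  | append_singleton l x ih =>
    rw [List.foldl_append, List.foldl_append, List.foldl_cons, List.foldl_nil,
      List.foldl_cons, List.foldl_nil]
    have hpw : (List.foldl (fun acc x =>
        PySem.List.insertBy (fun a b => decide ((fun x => x.1.length) b < (fun x => x.1.length) a)) x acc) [] l).Pairwise
        (fun a b => b.1.length ≤ a.1.length) := by
      rw [← PySem.List.sorted_rev_eq_foldl_insertBy l (fun x => x.1.length)]
      exact PySem.List.sorted_pairwise_rev l (fun x => x.1.length)
    rw [pvFind?_insertBy n u x _ hpw, ih]
    cases hf : l.foldl (pvStepP n u) none with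
    | none => rfl
    | some y =>
      obtain ⟨bc, bd⟩ := y
      simp [pvStepP]

-- A's build loop (before the sort) is the row-wise filterMap.
theorem pvStepA_eq (acc : List (List Char × String)) (row : List String) :
    pvStepA acc row = acc ++ (pvRowEntry row).toList := by
  unfold pvStepA pvRowEntry
  by_cases h1 : row.length < 2
  · rw [if_pos h1, if_pos h1]; simp
  · rw [if_neg h1, if_neg h1]
    by_cases h2 : PySem.Chars.strip (row.getD 0 "").toList = []
    · rw [if_pos h2, if_pos h2]; simp
    · rw [if_neg h2, if_neg h2]; simp

theorem pvBuild_eq_filterMap (rows : List (List String)) (acc : List (List Char × String)) :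
    rows.foldl pvStepA acc = acc ++ rows.filterMap pvRowEntry := by
  induction rows generalizing acc with
  | nil => simp
  | cons row rest ih =>
    rw [List.foldl_cons, List.filterMap_cons, pvStepA_eq, ih]
    cases h : pvRowEntry row <;> simp

-- B's row step is the pair step applied to the extracted entry (skipped rows leave the best unchanged).
theorem pvStepB_eq (n u : List Char) (best : Option (List Char × String)) (row : List String) :
    pvStepB n u best row = (match pvRowEntry row with
      | none => best
      | some p => pvStepP n u best p) := by
  unfold pvStepB pvRowEntry pvStepP
  by_cases h1 : row.length < 2
  · rw [if_pos h1, if_pos h1]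
  · rw [if_neg h1, if_neg h1]
    by_cases h2 : PySem.Chars.strip (row.getD 0 "").toList = []
    · have hcu : PySem.Chars.upper (PySem.Chars.strip (row.getD 0 "").toList) = [] := by
        unfold PySem.Chars.upper; rw [List.map_eq_nil_iff]; exact h2
      rw [if_pos hcu, if_pos h2]
    · have hcu : PySem.Chars.upper (PySem.Chars.strip (row.getD 0 "").toList) ≠ [] := by
        unfold PySem.Chars.upper; rw [ne_eq, List.map_eq_nil_iff]; exact h2
      rw [if_neg hcu, if_neg h2]

-- B's row fold is the pair fold over the same filterMap.
theorem pvFoldB_eq_foldP (n u : List Char) (rows : List (List String))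
    (best : Option (List Char × String)) :
    rows.foldl (pvStepB n u) best = (rows.filterMap pvRowEntry).foldl (pvStepP n u) best := by
  induction rows generalizing best with
  | nil => rfl
  | cons row rest ih =>
    rw [List.foldl_cons, List.filterMap_cons, pvStepB_eq]
    cases h : pvRowEntry row with
    | none => exact ih best
    | some p => rw [List.foldl_cons]; exact ih _

-- ===== VERDICT (by name: the statement is the Claim_ definition above) =====
theorem model_description_py_spec : Claim_equal_model_description_py := by
  intro model_name section_descriptions _
  unfold Spec_model_description_py model_description_py model_description_py_alt
  simp only
  by_cases hmu : PySem.Chars.upper (PySem.Chars.strip model_name.toList) = []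
  · simp [hmu]
  · rw [if_neg hmu, if_neg hmu]
    set u := PySem.Chars.upper (PySem.Chars.strip model_name.toList) with hu
    set n := PySem.Chars.replace (PySem.Chars.replace
      (PySem.Chars.replace u ['.'] ['_']) ['-'] ['_']) [' '] ['_'] with hn
    have hently : ∀ rows : List (List String),
        pvScanA n u (PySem.List.sorted (rows.filterMap pvRowEntry) (fun x => x.1.length) true)
          = (match rows.foldl (pvStepB n u) none with
              | some (_, d) => d
              | none => "—") := by
      intro rows
      rw [pvScanA_eq_find?, pvCore, pvFoldB_eq_foldP]
      cases hres : (rows.filterMap pvRowEntry).foldl (pvStepP n u) none with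
      | none => rfl
      | some p => obtain ⟨a, b⟩ := p; rfl
    cases section_descriptions with
    | none => rfl
    | some rows =>
      rw [Option.getD_some]
      have hBL : pvBuildLookup (some rows)
          = if rows = [] then []
            else PySem.List.sorted (rows.foldl pvStepA []) (fun x => x.1.length) true := rfl
      by_cases hr : rows = []
      · subst hr; rfl
      · rw [hBL, if_neg hr, pvBuild_eq_filterMap rows [], List.nil_append]
        by_cases hl : PySem.List.sorted (rows.filterMap pvRowEntry) (fun x => x.1.length) true = []
        · rw [if_pos hl]
          have hnil : rows.filterMap pvRowEntry = [] :=
            (PySem.List.sorted_eq_nil_iff _ _ _).mp hl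
          have hfb : rows.foldl (pvStepB n u) none = none := by
            rw [pvFoldB_eq_foldP, hnil]; rfl
          rw [hfb]
        · rw [if_neg hl]
          exact hently rows
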